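-- pv_equiv track=rewrite | github.com/Gopalkataria/dsa | Ass2/testing.py | is_valid_level_order
-- ===== SOURCE A (Python) =====
-- def is_valid_level_order(num_nodes, values):
--     # Check if the number of nodes matches the length of the values list
--     if num_nodes != len(values):
--         return False
--
--     # Check if the input follows the level order traversal rules
--     for i in range(num_nodes):
--         if values[i] != 0 and values[i] != 1:
--             return False
--         if i * 2 + 1 < num_nodes and values[i] == 0 and values[i * 2 + 1] != 0:
--             return False
--         if i * 2 + 2 < num_nodes and values[i] == 0 and values[i * 2 + 2] != 0:
--             return False
--
--     return True
-- ===== SOURCE B (Python) =====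
-- def is_valid_level_order(num_nodes, values):
--     if num_nodes != len(values):
--         return False
--
--     def all_zero(i):
--         # the whole subtree rooted at i must be zeros
--         if i >= num_nodes:
--             return True
--         return values[i] == 0 and all_zero(2 * i + 1) and all_zero(2 * i + 2)
--
--     def valid(i):
--         if i >= num_nodes:
--             return True
--         v = values[i]
--         if v == 1:
--             return valid(2 * i + 1) and valid(2 * i + 2)
--         if v == 0:
--             return all_zero(2 * i + 1) and all_zero(2 * i + 2)
--         return False
--
--     return valid(0)
-- ===== Notes on version B (the rewrite author's own statement) =====
-- stated objective: alternative
-- what changed: A's flat index scan over range(n) is replaced by a recursive depth-first descent over the implicit heap: a 'valid' recursion that, on seeing a 0 node, switches to an 'all_zero' subtree check, so the zero-propagation constraint is enforced structurally instead of per-index.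
import Mathlib
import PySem

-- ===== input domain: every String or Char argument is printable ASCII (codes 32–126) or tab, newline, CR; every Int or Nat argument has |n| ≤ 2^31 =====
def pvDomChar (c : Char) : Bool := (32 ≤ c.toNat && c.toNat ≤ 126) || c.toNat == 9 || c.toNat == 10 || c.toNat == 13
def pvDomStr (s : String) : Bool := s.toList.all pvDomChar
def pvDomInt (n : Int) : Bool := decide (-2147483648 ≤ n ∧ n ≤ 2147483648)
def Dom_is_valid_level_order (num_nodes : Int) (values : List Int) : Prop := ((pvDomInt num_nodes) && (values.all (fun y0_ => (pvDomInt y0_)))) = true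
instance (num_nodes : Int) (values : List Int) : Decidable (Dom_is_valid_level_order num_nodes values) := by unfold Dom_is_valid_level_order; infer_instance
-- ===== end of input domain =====

-- B replaces A's flat index scan by a recursive depth-first descent over the implicit heap
-- (a 'valid' recursion that switches to an 'all_zero' subtree check under a 0 node);
-- only the returned Bool is claimed equal (alternative decomposition).

-- ===== PORT A =====
def is_valid_level_order (num_nodes : Int) (values : List Int) : Bool :=
  if num_nodes ≠ (values.length : Int) then false
  else
    (PySem.List.pyRange 0 num_nodes 1).all fun i =>
      let vi := PySem.List.pyGetD values i 0
      if vi ≠ 0 ∧ vi ≠ 1 then false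
      else if i * 2 + 1 < num_nodes ∧ vi = 0 ∧ PySem.List.pyGetD values (i * 2 + 1) 0 ≠ 0 then false
      else if i * 2 + 2 < num_nodes ∧ vi = 0 ∧ PySem.List.pyGetD values (i * 2 + 2) 0 ≠ 0 then false
      else true

-- ===== PORT B =====
-- Source B's indices are ints that (after the length guard) stay nonnegative and are only read
-- when < num_nodes, so they are ported as Nat with n = values.length; values[i] is exact
-- as values.getD i 0 on that in-range domain.
def altAllZero (values : List Int) (n i : Nat) : Bool :=
  if _h : i < n then
    values.getD i 0 == 0 && altAllZero values n (2 * i + 1) && altAllZero values n (2 * i + 2)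
  else true
termination_by n - i
decreasing_by all_goals omega

def altValid (values : List Int) (n i : Nat) : Bool :=
  if _h : i < n then
    let v := values.getD i 0
    if v == 1 then altValid values n (2 * i + 1) && altValid values n (2 * i + 2)
    else if v == 0 then altAllZero values n (2 * i + 1) && altAllZero values n (2 * i + 2)
    else false
  else true
termination_by n - i
decreasing_by all_goals omega

def is_valid_level_order_alt (num_nodes : Int) (values : List Int) : Bool :=
  if num_nodes ≠ (values.length : Int) then false
  else altValid values values.length 0

-- ===== PRECONDITION & SPEC =====
def Spec_is_valid_level_order (num_nodes : Int) (values : List Int) (out : Bool) : Prop := out = is_valid_level_order_alt num_nodes values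
instance (num_nodes : Int) (values : List Int) (out : Bool) : Decidable (Spec_is_valid_level_order num_nodes values out) := by unfold Spec_is_valid_level_order; infer_instance

-- ===== CLAIM (what is proved, stated in full; the proofs are below) =====
def Claim_equal_is_valid_level_order : Prop := ∀ (num_nodes : Int) (values : List Int), Dom_is_valid_level_order num_nodes values → Spec_is_valid_level_order num_nodes values (is_valid_level_order num_nodes values)

-- ===== LEMMAS AND PROOFS =====

inductive Desc : Nat → Nat → Prop
  | refl (i : Nat) : Desc i i
  | left {i k : Nat} : Desc i k → Desc i (2 * k + 1)
  | right {i k : Nat} : Desc i k → Desc i (2 * k + 2)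

theorem desc_le {i k : Nat} (h : Desc i k) : i ≤ k := by
  induction h with
  | refl => exact Nat.le_refl _
  | left _ ih => omega
  | right _ ih => omega

theorem desc_trans {a b c : Nat} (h1 : Desc a b) (h2 : Desc b c) : Desc a c := by
  induction h2 with
  | refl => exact h1
  | left _ ih => exact Desc.left ih
  | right _ ih => exact Desc.right ih

theorem desc_cases {i k : Nat} (h : Desc i k) :
    k = i ∨ Desc (2 * i + 1) k ∨ Desc (2 * i + 2) k := by
  induction h with
  | refl => exact Or.inl rfl
  | left _ ih =>
    rcases ih with rfl | h | h
    · exact Or.inr (Or.inl (Desc.refl _))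
    · exact Or.inr (Or.inl (Desc.left h))
    · exact Or.inr (Or.inr (Desc.left h))
  | right _ ih =>
    rcases ih with rfl | h | h
    · exact Or.inr (Or.inr (Desc.refl _))
    · exact Or.inr (Or.inl (Desc.right h))
    · exact Or.inr (Or.inr (Desc.right h))

theorem desc_zero (k : Nat) : Desc 0 k := by
  induction k using Nat.strong_induction_on with
  | _ k ih =>
    match k with
    | 0 => exact Desc.refl 0
    | (m+1) =>
      rcases Nat.even_or_odd m with ⟨p, hp⟩ | ⟨p, hp⟩
      · have h : m + 1 = 2 * p + 1 := by omega
        rw [h]; exact Desc.left (ih p (by omega))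
      · have h : m + 1 = 2 * p + 2 := by omega
        rw [h]; exact Desc.right (ih p (by omega))

def good (values : List Int) (n k : Nat) : Prop :=
  (values.getD k 0 = 0 ∨ values.getD k 0 = 1) ∧
  (values.getD k 0 = 0 →
    (2 * k + 1 < n → values.getD (2 * k + 1) 0 = 0) ∧
    (2 * k + 2 < n → values.getD (2 * k + 2) 0 = 0))

theorem az_iff (values : List Int) (n i : Nat) :
    altAllZero values n i = true ↔ ∀ k, Desc i k → k < n → values.getD k 0 = 0 := by
  induction i using altAllZero.induct n with
  | case1 i h ih1 ih2 =>
    rw [altAllZero, dif_pos h]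
    simp only [Bool.and_eq_true, beq_iff_eq, ih1, ih2]
    constructor
    · rintro ⟨⟨h0, hl⟩, hr⟩ k hd hk
      rcases desc_cases hd with rfl | hd | hd
      · exact h0
      · exact hl k hd hk
      · exact hr k hd hk
    · intro hall
      exact ⟨⟨hall i (Desc.refl i) h, fun k hd hk => hall k (desc_trans (Desc.left (Desc.refl i)) hd) hk⟩,
             fun k hd hk => hall k (desc_trans (Desc.right (Desc.refl i)) hd) hk⟩
  | case2 i h =>
    rw [altAllZero, dif_neg h]
    simp only [true_iff]
    intro k hd hk
    exact absurd (desc_le hd) (by omega)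

theorem zero_spread (values : List Int) (n i : Nat)
    (hg : ∀ k, Desc i k → k < n → good values n k)
    (h0 : values.getD i 0 = 0) :
    ∀ k, Desc i k → k < n → values.getD k 0 = 0 := by
  intro k hd
  induction hd with
  | refl => intro _; exact h0
  | @left m hm ih =>
    intro hk
    have hmn : m < n := by omega
    exact ((hg m hm hmn).2 (ih hmn)).1 hk
  | @right m hm ih =>
    intro hk
    have hmn : m < n := by omega
    exact ((hg m hm hmn).2 (ih hmn)).2 hk

theorem av_iff (values : List Int) (n i : Nat) :
    altValid values n i = true ↔ ∀ k, Desc i k → k < n → good values n k := by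
  induction i using altValid.induct values n with
  | case1 i h v hv1 ih1 ih2 =>
    rw [altValid, dif_pos h, if_pos (show (values.getD i 0 == 1) = true from hv1)]
    simp only [Bool.and_eq_true, ih1, ih2]
    have hv1' : values.getD i 0 = 1 := by simpa using hv1
    constructor
    · rintro ⟨hl, hr⟩ k hd hk
      rcases desc_cases hd with rfl | hd | hd
      · exact ⟨Or.inr hv1', fun h0 => by rw [hv1'] at h0; cases h0⟩
      · exact hl k hd hk
      · exact hr k hd hk
    · intro hall
      exact ⟨fun k hd hk => hall k (desc_trans (Desc.left (Desc.refl i)) hd) hk,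
             fun k hd hk => hall k (desc_trans (Desc.right (Desc.refl i)) hd) hk⟩
  | case2 i h v hv1 hv0 =>
    rw [altValid, dif_pos h, if_neg (show ¬ (values.getD i 0 == 1) = true from hv1),
        if_pos (show (values.getD i 0 == 0) = true from hv0)]
    simp only [Bool.and_eq_true, az_iff]
    have hv0' : values.getD i 0 = 0 := by simpa using hv0
    constructor
    · rintro ⟨hl, hr⟩ k hd hk
      rcases desc_cases hd with rfl | hd | hd
      · exact ⟨Or.inl hv0', fun _ => ⟨fun hlt => hl _ (Desc.refl _) hlt, fun hlt => hr _ (Desc.refl _) hlt⟩⟩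
      · exact ⟨Or.inl (hl k hd hk), fun _ => ⟨fun hlt => hl _ (Desc.left hd) hlt, fun hlt => hl _ (Desc.right hd) hlt⟩⟩
      · exact ⟨Or.inl (hr k hd hk), fun _ => ⟨fun hlt => hr _ (Desc.left hd) hlt, fun hlt => hr _ (Desc.right hd) hlt⟩⟩
    · intro hall
      have hz := zero_spread values n i hall hv0'
      exact ⟨fun k hd hk => hz k (desc_trans (Desc.left (Desc.refl i)) hd) hk,
             fun k hd hk => hz k (desc_trans (Desc.right (Desc.refl i)) hd) hk⟩
  | case3 i h v hv1 hv0 =>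
    rw [altValid, dif_pos h, if_neg (show ¬ (values.getD i 0 == 1) = true from hv1),
        if_neg (show ¬ (values.getD i 0 == 0) = true from hv0)]
    simp only [Bool.false_eq_true, false_iff]
    intro hall
    have hgood := hall i (Desc.refl i) h
    rcases hgood.1 with h0 | h1
    · exact absurd (beq_iff_eq.mpr h0) (by simpa using hv0)
    · exact absurd (beq_iff_eq.mpr h1) (by simpa using hv1)
  | case4 i h =>
    rw [altValid, dif_neg h]
    simp only [true_iff]
    intro k hd hk
    exact absurd (desc_le hd) (by omega)

theorem a_iff (values : List Int) :
    is_valid_level_order (values.length : Int) values = true ↔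
      ∀ k, k < values.length → good values values.length k := by
  unfold is_valid_level_order
  rw [if_neg (by simp)]
  simp only [List.all_eq_true, PySem.List.mem_pyRange_one, and_imp, Bool.ite_eq_true_distrib,
    not_and, Bool.false_eq_true, if_false_left,
    not_not]
  constructor
  · intro hA k hk
    have h := hA (k : Int) (by exact_mod_cast Nat.zero_le k) (by exact_mod_cast hk)
    simp only [PySem.List.pyGetD_natCast] at h
    refine ⟨by tauto, fun h0 => ⟨fun hlt => ?_, fun hlt => ?_⟩⟩
    · have := h.2.1
      have hc : (k : Int) * 2 + 1 < (values.length : Int) := by omega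
      have h1 := this hc h0
      have hcast : (k : Int) * 2 + 1 = ((2 * k + 1 : Nat) : Int) := by omega
      rw [hcast, PySem.List.pyGetD_natCast] at h1
      exact h1
    · have := h.2.2.1
      have hc : (k : Int) * 2 + 2 < (values.length : Int) := by omega
      have h2 := this hc h0
      have hcast : (k : Int) * 2 + 2 = ((2 * k + 2 : Nat) : Int) := by omega
      rw [hcast, PySem.List.pyGetD_natCast] at h2
      exact h2
  · intro hg x hx0 hxlen
    have hxnat : x.toNat < values.length := by omega
    have hx : x = ((x.toNat : Nat) : Int) := by omega
    obtain ⟨h1, h2⟩ := hg x.toNat hxnat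
    rw [hx]
    simp only [PySem.List.pyGetD_natCast]
    refine ⟨by tauto, fun hc h0 => ?_, fun hc h0 => ?_, trivial⟩
    · have hlt : 2 * x.toNat + 1 < values.length := by
        rw [hx] at hc; omega
      have hz := (h2 h0).1 hlt
      have hcast : ((x.toNat : Nat) : Int) * 2 + 1 = ((2 * x.toNat + 1 : Nat) : Int) := by omega
      rw [hcast, PySem.List.pyGetD_natCast]
      exact hz
    · have hlt : 2 * x.toNat + 2 < values.length := by
        rw [hx] at hc; omega
      have hz := (h2 h0).2 hlt
      have hcast : ((x.toNat : Nat) : Int) * 2 + 2 = ((2 * x.toNat + 2 : Nat) : Int) := by omega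
      rw [hcast, PySem.List.pyGetD_natCast]
      exact hz

theorem key (values : List Int) :
    is_valid_level_order (values.length : Int) values = is_valid_level_order_alt (values.length : Int) values := by
  have hb : is_valid_level_order_alt (values.length : Int) values = altValid values values.length 0 := by
    unfold is_valid_level_order_alt; rw [if_neg (by simp)]
  rw [hb, Bool.eq_iff_iff, a_iff, av_iff]
  constructor
  · intro h k _ hk; exact h k hk
  · intro h k hk; exact h k (desc_zero k) hk

-- ===== VERDICT (by name: the statement is the Claim_ definition above) =====
theorem is_valid_level_order_spec : Claim_equal_is_valid_level_order := by
  intro n values _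
  unfold Spec_is_valid_level_order
  by_cases h : n = (values.length : Int)
  · subst h; exact key values
  · unfold is_valid_level_order is_valid_level_order_alt
    rw [if_pos h, if_pos h]
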